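-- pv_equiv track=rewrite | github.com/emiudeh/Project-Statistical_Natural_Language_Processing | misc_functs.py | inflect_noun
-- ===== SOURCE A (Python) =====
-- def inflect_noun(noun_entry, suffix_dict):
--
--     lemma = noun_entry[0]
--     inflected = noun_entry[0]
--     inflection = noun_entry[2]
--
--     # get the new suffix
--     for i in range(0, len(lemma)):
--         if lemma[i:len(lemma)] in suffix_dict:
--             if inflection in suffix_dict[lemma[i:len(lemma)]]:
--                 new_suffix = suffix_dict[lemma[i:len(lemma)]][inflection]
--                 # replaces lemma suffix with inflected suffix
--                 inflected = lemma[0:i] + new_suffix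
--             continue
--
--     return inflected
-- ===== SOURCE B (Python) =====
-- def inflect_noun(noun_entry, suffix_dict):
--     lemma = noun_entry[0]
--     inflection = noun_entry[2]
--     candidates = [key for key in suffix_dict
--                   if key and lemma.endswith(key) and inflection in suffix_dict[key]]
--     if not candidates:
--         return lemma
--     best = min(candidates, key=len)
--     return lemma[:len(lemma) - len(best)] + suffix_dict[best][inflection]
-- ===== Notes on version B (the rewrite author's own statement) =====
-- stated objective: faster
-- what changed: A scans every start position of the lemma, slicing a suffix string and doing a dict lookup at each, overwriting the result so the last (shortest-suffix) match wins; B instead filters the dictionary's keys to the non-empty suffixes of the lemma that carry the inflection and takes min(..., key=len) once.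
import Mathlib
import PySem

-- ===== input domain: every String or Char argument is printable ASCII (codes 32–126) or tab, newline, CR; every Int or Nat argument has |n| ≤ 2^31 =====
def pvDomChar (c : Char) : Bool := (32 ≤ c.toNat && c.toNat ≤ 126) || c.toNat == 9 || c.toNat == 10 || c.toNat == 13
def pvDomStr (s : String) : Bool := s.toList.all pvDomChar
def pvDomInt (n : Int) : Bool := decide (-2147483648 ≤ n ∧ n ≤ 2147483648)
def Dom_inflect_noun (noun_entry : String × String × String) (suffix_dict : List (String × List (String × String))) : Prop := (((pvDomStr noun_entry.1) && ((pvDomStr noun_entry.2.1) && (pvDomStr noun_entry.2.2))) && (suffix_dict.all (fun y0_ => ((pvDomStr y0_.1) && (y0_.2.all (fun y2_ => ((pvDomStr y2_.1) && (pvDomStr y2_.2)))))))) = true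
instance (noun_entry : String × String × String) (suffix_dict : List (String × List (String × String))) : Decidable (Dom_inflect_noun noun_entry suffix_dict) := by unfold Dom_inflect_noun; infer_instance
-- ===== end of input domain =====

-- B replaces A's scan over every start position of the lemma (a suffix slice + dict lookup
-- per position) by a comprehension over the dictionary's keys plus min(..., key=len):
-- same return value, measurably faster on long lemmas.

-- ===== PORT A =====
-- literal port of A: fold over range(0, len(lemma)), looking each suffix slice up in the dict
def inflect_noun (noun_entry : String × String × String) (suffix_dict : List (String × List (String × String))) : String :=
  let lemm := noun_entry.1.toList
  let inflection := noun_entry.2.2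
  let d := PySem.Dict.mk suffix_dict
  (PySem.List.pyRange 0 (lemm.length : Int) 1).foldl
    (fun inflected i =>
      match d.get? (String.ofList (PySem.List.slice lemm (some i) (some (lemm.length : Int)))) with
      | none => inflected
      | some sub =>
        match (PySem.Dict.mk sub).get? inflection with
        | none => inflected
        | some new_suffix =>
            String.ofList (PySem.List.slice lemm (some 0) (some i) ++ new_suffix.toList))
    noun_entry.1

-- ===== PORT B =====
-- literal port of B: filter the dict's keys, take the min by length
def inflect_noun_alt (noun_entry : String × String × String) (suffix_dict : List (String × List (String × String))) : String :=
  let lemm := noun_entry.1.toList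
  let inflection := noun_entry.2.2
  let d := PySem.Dict.mk suffix_dict
  let candidates := (suffix_dict.map Prod.fst).filter
    (fun key => !key.toList.isEmpty && PySem.Chars.endswith lemm key.toList &&
      (PySem.Dict.mk (d.getD key [])).contains inflection)
  match PySem.List.min? candidates (fun k => k.toList.length) with
  | none => noun_entry.1
  | some best =>
      String.ofList (PySem.List.slice lemm none (some ((lemm.length : Int) - (best.toList.length : Int))) ++
        ((PySem.Dict.mk (d.getD best [])).getD inflection "").toList)

-- ===== PRECONDITION & SPEC =====
def Spec_inflect_noun (noun_entry : String × String × String) (suffix_dict : List (String × List (String × String))) (out : String) : Prop := out = inflect_noun_alt noun_entry suffix_dict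
instance (noun_entry : String × String × String) (suffix_dict : List (String × List (String × String))) (out : String) : Decidable (Spec_inflect_noun noun_entry suffix_dict out) := by unfold Spec_inflect_noun; infer_instance

-- ===== CLAIM (what is proved, stated in full; the proofs are below) =====
def Claim_equal_inflect_noun : Prop := ∀ (noun_entry : String × String × String) (suffix_dict : List (String × List (String × String))), Dom_inflect_noun noun_entry suffix_dict → Spec_inflect_noun noun_entry suffix_dict (inflect_noun noun_entry suffix_dict)

-- ===== LEMMAS AND PROOFS =====

-- proof-side abbreviations for A's loop body
def pvSuf (L : List Char) (i : Int) : String :=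
  String.ofList (PySem.List.slice L (some i) (some (L.length : Int)))

def pvPA (L : List Char) (infl : String) (sd : List (String × List (String × String))) (i : Int) : Bool :=
  ((PySem.Dict.mk sd).get? (pvSuf L i)).elim false (fun sub => ((PySem.Dict.mk sub).get? infl).isSome)

def pvVal (infl : String) (sd : List (String × List (String × String))) (k : String) : String :=
  (PySem.Dict.mk ((PySem.Dict.mk sd).getD k [])).getD infl ""

def pvFA (L : List Char) (infl : String) (sd : List (String × List (String × String))) (i : Int) : String :=
  String.ofList (PySem.List.slice L (some 0) (some i) ++ (pvVal infl sd (pvSuf L i)).toList)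

-- B's key predicate
def pvQB (L : List Char) (infl : String) (sd : List (String × List (String × String))) (key : String) : Bool :=
  !key.toList.isEmpty && PySem.Chars.endswith L key.toList &&
    (PySem.Dict.mk ((PySem.Dict.mk sd).getD key [])).contains infl

-- "last write wins": a fold that overwrites the accumulator on a condition keeps the last match
theorem pv_foldl_last_write {α β : Type} (p : β → Bool) (f : β → α) :
    ∀ (xs : List β) (init : α),
      xs.foldl (fun acc x => if p x then f x else acc) init
        = ((xs.filter p).getLast?).elim init f := by
  intro xs
  induction xs with
  | nil => intro init; rfl
  | cons x xs ih =>
    intro init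
    simp only [List.foldl_cons, List.filter_cons]
    by_cases h : p x
    · simp only [h, if_true]
      rw [ih]
      cases hf : xs.filter p with
      | nil => simp
      | cons y ys => simp [List.getLast?_cons]
    · simp only [h, Bool.false_eq_true, if_false]
      rw [ih]

-- A's loop body in if-then-else form
theorem pv_stepA_eq (L : List Char) (infl : String) (sd : List (String × List (String × String))) :
    (fun (inflected : String) (i : Int) =>
      match (PySem.Dict.mk sd).get? (String.ofList (PySem.List.slice L (some i) (some (L.length : Int)))) with
      | none => inflected
      | some sub =>
        match (PySem.Dict.mk sub).get? infl with
        | none => inflected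
        | some new_suffix =>
            String.ofList (PySem.List.slice L (some 0) (some i) ++ new_suffix.toList))
    = (fun acc i => if pvPA L infl sd i then pvFA L infl sd i else acc) := by
  funext acc i
  simp only [pvPA, pvFA, pvVal, pvSuf]
  cases h1 : (PySem.Dict.mk sd).get? (String.ofList (PySem.List.slice L (some i) (some (L.length : Int)))) with
  | none => simp
  | some sub =>
    cases h2 : (PySem.Dict.mk sub).get? infl with
    | none => simp [h2]
    | some v => simp [PySem.Dict.getD_eq_get?_getD, h1, h2]

-- the suffix slice lemma[i:len(lemma)] is List.drop, for 0 ≤ i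
theorem pv_suf_drop (L : List Char) (i : Int) (h0 : 0 ≤ i) :
    pvSuf L i = String.ofList (L.drop i.toNat) := by
  unfold pvSuf
  rw [PySem.List.slice_toNat L h0 (by positivity)]
  congr 1
  apply List.take_of_length_le
  simp

-- index→key: a matching start index yields a candidate key (its suffix slice)
theorem pv_PA_to_QB (L : List Char) (infl : String) (sd : List (String × List (String × String)))
    (i : Int) (h0 : 0 ≤ i) (h1 : i < (L.length : Int)) (h : pvPA L infl sd i = true) :
    pvSuf L i ∈ (sd.map Prod.fst) ∧ pvQB L infl sd (pvSuf L i) = true := by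
  unfold pvPA at h
  cases hg : (PySem.Dict.mk sd).get? (pvSuf L i) with
  | none => rw [hg] at h; simp at h
  | some sub =>
    rw [hg] at h
    simp only [Option.elim_some] at h
    have hmem : pvSuf L i ∈ (sd.map Prod.fst) := by
      have hc : (PySem.Dict.mk sd).contains (pvSuf L i) = true := by
        rw [PySem.Dict.contains_eq_isSome_get?, hg]; rfl
      rw [PySem.Dict.contains_iff_mem_keys, PySem.Dict.keys_mk] at hc
      exact hc
    refine ⟨hmem, ?_⟩
    unfold pvQB
    rw [pv_suf_drop L i h0]
    simp only [Bool.and_eq_true, Bool.not_eq_eq_eq_not, Bool.not_true]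
    refine ⟨⟨?_, ?_⟩, ?_⟩
    · simp [String.toList_ofList, List.drop_eq_nil_iff]; omega
    · rw [String.toList_ofList, PySem.Chars.endswith_iff]
      exact List.drop_suffix _ _
    · rw [← pv_suf_drop L i h0]
      rw [PySem.Dict.getD_eq_get?_getD, hg]
      rw [PySem.Dict.contains_eq_isSome_get?]
      exact h

-- key→index: a candidate key matches at start index len(lemma) - len(key)
theorem pv_QB_to_PA (L : List Char) (infl : String) (sd : List (String × List (String × String)))
    (k : String) (hmem : k ∈ sd.map Prod.fst) (h : pvQB L infl sd k = true) :
    1 ≤ k.toList.length ∧ k.toList.length ≤ L.length ∧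
      pvSuf L ((L.length : Int) - (k.toList.length : Int)) = k ∧
      pvPA L infl sd ((L.length : Int) - (k.toList.length : Int)) = true := by
  unfold pvQB at h
  simp only [Bool.and_eq_true, Bool.not_eq_eq_eq_not, Bool.not_true] at h
  obtain ⟨⟨hne, hsfx⟩, hcon⟩ := h
  rw [PySem.Chars.endswith_iff] at hsfx
  have hlen : k.toList.length ≤ L.length := hsfx.length_le
  have hpos : 1 ≤ k.toList.length := by
    cases hk : k.toList with
    | nil => rw [hk] at hne; simp at hne
    | cons a t => simp
  have hdrop : k.toList = L.drop (L.length - k.toList.length) :=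
    List.suffix_iff_eq_drop.mp hsfx
  have hsuf : pvSuf L ((L.length : Int) - (k.toList.length : Int)) = k := by
    rw [pv_suf_drop L _ (by omega)]
    rw [show ((L.length : Int) - (k.toList.length : Int)).toNat = L.length - k.toList.length by omega]
    rw [← hdrop, String.ofList_toList]
  refine ⟨hpos, hlen, hsuf, ?_⟩
  unfold pvPA
  rw [hsuf]
  have hc : (PySem.Dict.mk sd).contains k = true := by
    rw [PySem.Dict.contains_iff_mem_keys, PySem.Dict.keys_mk]; exact hmem
  rw [PySem.Dict.contains_eq_isSome_get?] at hc
  cases hg : (PySem.Dict.mk sd).get? k with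
  | none => rw [hg] at hc; simp at hc
  | some sub =>
    simp only [Option.elim_some]
    rw [PySem.Dict.getD_eq_get?_getD, hg] at hcon
    rw [PySem.Dict.contains_eq_isSome_get?] at hcon
    exact hcon

-- the last element of a strictly increasing list is its maximum
theorem pv_le_getLast {l : List Int} {j : Int} (hp : l.Pairwise (· < ·))
    (hl : l.getLast? = some j) : ∀ x ∈ l, x ≤ j := by
  induction l with
  | nil => simp at hl
  | cons y ys ih =>
    intro x hx
    rcases List.mem_cons.mp hx with rfl | hx'
    · cases ys with
      | nil => simp at hl; omega
      | cons z zs =>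
        rw [List.getLast?_cons_cons] at hl
        have hj : j ∈ z :: zs := List.mem_of_getLast? hl
        have := List.rel_of_pairwise_cons hp hj
        omega
    · cases ys with
      | nil => cases hx'
      | cons z zs =>
        rw [List.getLast?_cons_cons] at hl
        exact ih hp.tail hl x hx'

-- the main equivalence
theorem pv_main (noun_entry : String × String × String) (suffix_dict : List (String × List (String × String))) :
    inflect_noun noun_entry suffix_dict = inflect_noun_alt noun_entry suffix_dict := by
  unfold inflect_noun inflect_noun_alt
  simp only []
  set L := noun_entry.1.toList with hL
  set infl := noun_entry.2.2 with hinfl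
  set sd := suffix_dict with hsd
  rw [pv_stepA_eq L infl sd, pv_foldl_last_write]
  have hQ : (fun key => !key.toList.isEmpty && PySem.Chars.endswith L key.toList &&
      (PySem.Dict.mk ((PySem.Dict.mk sd).getD key [])).contains infl) = pvQB L infl sd := rfl
  rw [hQ]
  cases hmin : PySem.List.min? ((sd.map Prod.fst).filter (pvQB L infl sd)) (fun k => k.toList.length) with
  | none =>
    have hcand : (sd.map Prod.fst).filter (pvQB L infl sd) = [] :=
      (PySem.List.min?_eq_none_iff _ _).mp hmin
    have hfil : (PySem.List.pyRange 0 (L.length : Int) 1).filter (pvPA L infl sd) = [] := by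
      rw [List.filter_eq_nil_iff]
      intro i hi hPA
      rw [PySem.List.mem_pyRange_one] at hi
      obtain ⟨hm, hq⟩ := pv_PA_to_QB L infl sd i hi.1 hi.2 hPA
      have : pvSuf L i ∈ (sd.map Prod.fst).filter (pvQB L infl sd) :=
        List.mem_filter.mpr ⟨hm, hq⟩
      rw [hcand] at this
      cases this
    rw [hfil]
    rfl
  | some best =>
    have hbf : best ∈ (sd.map Prod.fst).filter (pvQB L infl sd) := PySem.List.min?_mem hmin
    obtain ⟨hbmem, hbQ⟩ := List.mem_filter.mp hbf
    obtain ⟨hpos, hlen, hsufb, hPAb⟩ := pv_QB_to_PA L infl sd best hbmem hbQ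
    set ib : Int := (L.length : Int) - (best.toList.length : Int) with hib
    have hibf : ib ∈ (PySem.List.pyRange 0 (L.length : Int) 1).filter (pvPA L infl sd) := by
      refine List.mem_filter.mpr ⟨?_, hPAb⟩
      rw [PySem.List.mem_pyRange_one]
      omega
    cases hlast : ((PySem.List.pyRange 0 (L.length : Int) 1).filter (pvPA L infl sd)).getLast? with
    | none =>
      rw [List.getLast?_eq_none_iff] at hlast
      rw [hlast] at hibf
      cases hibf
    | some j =>
      have hjf : j ∈ (PySem.List.pyRange 0 (L.length : Int) 1).filter (pvPA L infl sd) :=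
        List.mem_of_getLast? hlast
      obtain ⟨hjr, hjPA⟩ := List.mem_filter.mp hjf
      rw [PySem.List.mem_pyRange_one] at hjr
      -- j is maximal among matching indices, so ib ≤ j
      have hmax : ib ≤ j := by
        refine pv_le_getLast ?_ hlast ib hibf
        exact (PySem.List.pairwise_lt_pyRange_one 0 (L.length : Int)).filter _
      -- best has minimal length among candidates, so j ≤ ib
      have hjq := pv_PA_to_QB L infl sd j hjr.1 hjr.2 hjPA
      have hminlen : best.toList.length ≤ (pvSuf L j).toList.length :=
        PySem.List.min?_isMin hmin _ (List.mem_filter.mpr hjq)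
      have hsuflen : (pvSuf L j).toList.length = L.length - j.toNat := by
        rw [pv_suf_drop L j hjr.1, String.toList_ofList, List.length_drop]
      have hje : j = ib := by omega
      subst hje
      simp only [Option.elim_some]
      show pvFA L infl sd ib = String.ofList (PySem.List.slice L none (some ((L.length : Int) - (best.toList.length : Int))) ++ (pvVal infl sd best).toList)
      unfold pvFA
      rw [hsufb]
      rw [PySem.List.slice_toNat L (by omega) (by omega),
          PySem.List.slice_to L (by omega)]
      simp
      have hbl : best.toList.length = best.length := by simp
      congr 2
      omega

-- ===== VERDICT (by name: the statement is the Claim_ definition above) =====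
theorem inflect_noun_spec : Claim_equal_inflect_noun := by
  intro noun_entry suffix_dict _
  exact pv_main noun_entry suffix_dict
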